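-- pv_equiv track=rewrite | github.com/miadalavinezhad/DPLL_SAT_Solver | dpll.py | superset_elimination
-- ===== SOURCE A (Python) =====
-- def superset_elimination(formula):
--     for clause in formula:
--         clause.sort()
--
--     clean_formula = []
--     for i1, c1 in enumerate(formula):
--         for i2, c2 in enumerate(formula):
--            if i1 != i2 and len(c2) <= len(c1) and c2 == c1[:len(c2)]:
--                 break
--         else:
--             clean_formula.append(c1)
--
--     return clean_formula
-- ===== SOURCE B (Python) =====
-- def superset_elimination(formula):
--     for clause in formula:
--         clause.sort()
--
--     counts = {}
--     for c in formula:
--         t = tuple(c)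
--         counts[t] = counts.get(t, 0) + 1
--
--     clean_formula = []
--     for c in formula:
--         t = tuple(c)
--         if counts.get(t, 0) == 1 and all(counts.get(t[:k], 0) == 0 for k in range(len(c))):
--             clean_formula.append(c)
--     return clean_formula
-- ===== Notes on version B (the rewrite author's own statement) =====
-- stated objective: alternative
-- what changed: Replaces the all-pairs prefix scan with a hash map counting each sorted clause once: a clause is kept iff its count is 1 and none of its proper prefixes occurs as a key, removing the inner scan over all clauses (quadratic in clause count only in clause length instead).
import Mathlib
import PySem

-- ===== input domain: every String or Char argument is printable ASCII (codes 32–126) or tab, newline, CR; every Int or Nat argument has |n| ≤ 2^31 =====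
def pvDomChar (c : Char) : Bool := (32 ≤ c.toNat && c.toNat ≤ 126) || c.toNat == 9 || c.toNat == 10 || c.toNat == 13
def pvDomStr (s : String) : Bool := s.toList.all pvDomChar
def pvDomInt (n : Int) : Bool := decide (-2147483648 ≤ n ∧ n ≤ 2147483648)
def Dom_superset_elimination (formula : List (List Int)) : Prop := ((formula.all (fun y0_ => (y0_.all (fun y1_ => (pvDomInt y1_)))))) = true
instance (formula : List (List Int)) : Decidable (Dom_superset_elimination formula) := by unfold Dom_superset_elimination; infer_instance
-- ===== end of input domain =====

-- B replaces A's all-pairs prefix scan with a single count map over the sorted clauses;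
-- like A it sorts each clause of `formula` in place (equivalence here is about the return value; B performs the same mutation).
-- ===== PORT A =====
-- clause.sort(); then for each (i1,c1): break iff some (i2,c2), i2 != i1, len(c2) <= len(c1), c2 == c1[:len(c2)]
-- (c1[:len(c2)] with len(c2) >= 0 is List.take, exact)
def superset_elimination (formula : List (List Int)) : List (List Int) :=
  let sf := formula.map (fun c => PySem.List.sorted c (fun x => x) false)
  (PySem.List.enumerate sf 0).foldl (fun acc p =>
    if (PySem.List.enumerate sf 0).any (fun q =>
        q.1 != p.1 && decide (q.2.length ≤ p.2.length) && q.2 == p.2.take q.2.length)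
    then acc else acc ++ [p.2]) []

-- ===== PORT B =====
-- counts[t] = counts.get(t,0)+1 over the sorted clauses; keep c iff counts[c] == 1 and
-- counts.get(c[:k],0) == 0 for all k in range(len(c))  (c[:k], 0 <= k < len(c), is List.take, exact)
def superset_elimination_alt (formula : List (List Int)) : List (List Int) :=
  let sf := formula.map (fun c => PySem.List.sorted c (fun x => x) false)
  let counts : PySem.Dict (List Int) Int :=
    sf.foldl (fun d t => d.insert t (d.getD t 0 + 1)) PySem.Dict.empty
  sf.foldl (fun acc c =>
    if counts.getD c 0 == 1 && (List.range c.length).all (fun k => counts.getD (c.take k) 0 == 0)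
    then acc ++ [c] else acc) []

-- ===== PRECONDITION & SPEC =====
def Spec_superset_elimination (formula : List (List Int)) (out : List (List Int)) : Prop := out = superset_elimination_alt formula
instance (formula : List (List Int)) (out : List (List Int)) : Decidable (Spec_superset_elimination formula out) := by unfold Spec_superset_elimination; infer_instance

-- ===== CLAIM (what is proved, stated in full; the proofs are below) =====
def Claim_equal_superset_elimination : Prop := ∀ (formula : List (List Int)), Dom_superset_elimination formula → Spec_superset_elimination formula (superset_elimination formula)

-- ===== LEMMAS AND PROOFS =====

-- "some other index holds the same clause" is exactly "the clause occurs at least twice"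
lemma exists_other_iff (sf : List (List Int)) (k : Nat) (hk : k < sf.length)
    (c : List Int) (hc : sf[k] = c) :
    (∃ j, ∃ _ : j < sf.length, j ≠ k ∧ sf[j] = c) ↔ 2 ≤ sf.count c := by
  have hsplit : sf = sf.take k ++ c :: sf.drop (k+1) := by
    conv_lhs => rw [← List.take_append_drop k sf]
    rw [← hc, List.getElem_cons_drop hk]
  have hcount : sf.count c = (sf.take k).count c + 1 + (sf.drop (k+1)).count c := by
    conv_lhs => rw [hsplit]
    simp [List.count_append]
    omega
  constructor
  · rintro ⟨j, hj, hne, heq⟩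
    have hmem : c ∈ sf.take k ∨ c ∈ sf.drop (k+1) := by
      rcases Nat.lt_or_ge j k with hlt | hge
      · left
        have : (sf.take k)[j]'(by simp; omega) = sf[j] := List.getElem_take
        exact heq ▸ this ▸ List.getElem_mem _
      · right
        have hlen : j - (k+1) < (sf.drop (k+1)).length := by simp; omega
        have : (sf.drop (k+1))[j - (k+1)]'hlen = sf[j] := by
          rw [List.getElem_drop]; congr 1; omega
        exact heq ▸ this ▸ List.getElem_mem _
    rcases hmem with h | h
    · have := List.count_pos_iff.mpr h; omega
    · have := List.count_pos_iff.mpr h; omega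
  · intro h2
    have hpos2 : 0 < (sf.take k).count c + (sf.drop (k+1)).count c := by omega
    rcases Nat.lt_or_ge 0 ((sf.take k).count c) with hpos | hz
    · obtain ⟨j, hj, heq⟩ := List.getElem_of_mem (List.count_pos_iff.mp hpos)
      have hjk : j < k := by simp at hj; omega
      refine ⟨j, by omega, by omega, ?_⟩
      rw [← heq, List.getElem_take]
    · have hpos : 0 < (sf.drop (k+1)).count c := by omega
      obtain ⟨j, hj, heq⟩ := List.getElem_of_mem (List.count_pos_iff.mp hpos)
      have hjlen : k + 1 + j < sf.length := by simp at hj; omega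
      refine ⟨k + 1 + j, hjlen, by omega, ?_⟩
      rw [← heq, List.getElem_drop]

-- A's drop condition at index k = "duplicate clause, or some proper prefix occurs in the list"
lemma keep_iff (sf : List (List Int)) (k : Nat) (hk : k < sf.length) :
    (∃ j, ∃ _ : j < sf.length, j ≠ k ∧ sf[j].length ≤ sf[k].length ∧ sf[j] = sf[k].take sf[j].length)
    ↔ (2 ≤ sf.count sf[k] ∨ ∃ m < sf[k].length, sf[k].take m ∈ sf) := by
  constructor
  · rintro ⟨j, hj, hne, hle, heq⟩
    rcases Nat.lt_or_ge sf[j].length sf[k].length with hlt | hge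
    · right
      exact ⟨sf[j].length, hlt, heq ▸ List.getElem_mem _⟩
    · left
      have hlen : sf[j].length = sf[k].length := le_antisymm hle hge
      have : sf[j] = sf[k] := by rw [heq, hlen, List.take_length]
      exact (exists_other_iff sf k hk sf[k] rfl).mp ⟨j, hj, hne, this⟩
  · rintro (h2 | ⟨m, hm, hmem⟩)
    · obtain ⟨j, hj, hne, heq⟩ := (exists_other_iff sf k hk sf[k] rfl).mpr h2
      exact ⟨j, hj, hne, by rw [heq], by rw [heq, List.take_length]⟩
    · obtain ⟨j, hj, heq⟩ := List.getElem_of_mem hmem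
      have hlenj : sf[j].length = m := by rw [heq, List.length_take]; omega
      have hne : j ≠ k := by intro h; subst h; omega
      refine ⟨j, hj, hne, by omega, ?_⟩
      rw [heq]
      congr 1
      simp [Nat.min_eq_left (le_of_lt hm)]

-- A's keep test (negated inner any) equals B's count-based test, pointwise at index k
lemma pointwise (sf : List (List Int)) (k : Nat) (hk : k < sf.length) :
    (!(PySem.List.enumerate sf 0).any (fun q =>
        q.1 != ((0 : Int) + (k : Int)) && decide (q.2.length ≤ sf[k].length) && q.2 == sf[k].take q.2.length))
    = ((sf.count sf[k] : Int) == 1 &&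
       (List.range sf[k].length).all (fun m => ((sf.count (sf[k].take m) : Int)) == 0)) := by
  rw [Bool.eq_iff_iff]
  simp only [Bool.not_eq_eq_eq_not, Bool.not_true, List.any_eq_false, Bool.and_eq_true,
    List.all_eq_true, beq_iff_eq, bne_iff_ne, decide_eq_true_eq, List.mem_range]
  constructor
  · intro h
    have hno : ¬ (2 ≤ sf.count sf[k] ∨ ∃ m < sf[k].length, sf[k].take m ∈ sf) := by
      rw [← keep_iff sf k hk]
      rintro ⟨j, hj, hne, hle, heq⟩
      have := h (((0:Int) + (j:Int)), sf[j]) (by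
        rw [PySem.List.mem_enumerate_iff]; exact ⟨j, hj, rfl⟩)
      simp at this
      have hji : (j : Int) ≠ (k : Int) := by exact_mod_cast fun h' => hne (by exact_mod_cast h')
      exact absurd heq (this (by omega) hle)
    push Not at hno
    obtain ⟨h2, hpref⟩ := hno
    have h1 : 1 ≤ sf.count sf[k] := List.count_pos_iff.mpr (List.getElem_mem hk)
    constructor
    · exact_mod_cast (by omega : sf.count sf[k] = 1)
    · intro m hm
      have := hpref m hm
      rw [← List.count_eq_zero] at this
      exact_mod_cast this
  · rintro ⟨h1, hall⟩ q hq
    rw [PySem.List.mem_enumerate_iff] at hq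
    obtain ⟨j, hj, rfl⟩ := hq
    rintro ⟨⟨hne, hle⟩, heq⟩
    have hcnt1 : sf.count sf[k] = 1 := by exact_mod_cast h1
    have hnone : ¬ (∃ j, ∃ _ : j < sf.length, j ≠ k ∧ sf[j].length ≤ sf[k].length ∧ sf[j] = sf[k].take sf[j].length) := by
      rw [keep_iff sf k hk]
      rintro (h2 | ⟨m, hm, hmem⟩)
      · omega
      · have := hall m hm
        have : sf.count (sf[k].take m) = 0 := by exact_mod_cast this
        rw [List.count_eq_zero] at this
        exact this hmem
    apply hnone
    refine ⟨j, hj, ?_, hle, heq⟩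
    intro h'
    apply hne
    simp [h']

-- both ports, run on the same (already sorted) clause list, agree
lemma main_eq (sf : List (List Int)) :
    ((PySem.List.enumerate sf 0).foldl (fun acc p =>
      if (PySem.List.enumerate sf 0).any (fun q =>
          q.1 != p.1 && decide (q.2.length ≤ p.2.length) && q.2 == p.2.take q.2.length)
      then acc else acc ++ [p.2]) [])
    =
    (let counts : PySem.Dict (List Int) Int :=
      sf.foldl (fun d t => d.insert t (d.getD t 0 + 1)) PySem.Dict.empty
    sf.foldl (fun acc c =>
      if counts.getD c 0 == 1 && (List.range c.length).all (fun k => counts.getD (c.take k) 0 == 0)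
      then acc ++ [c] else acc) []) := by
  have hcount : ∀ t, (sf.foldl (fun d t => d.insert t (d.getD t 0 + 1))
      (PySem.Dict.empty : PySem.Dict (List Int) Int)).getD t 0 = (sf.count t : Int) := by
    intro t
    rw [PySem.Dict.getD_foldl_insert_add_one]
    simp
  simp only []
  rw [PySem.List.foldl_append_if_eq_filter]
  have hstep : (fun (acc : List (List Int)) (p : Int × List Int) =>
      if (PySem.List.enumerate sf 0).any (fun q =>
          q.1 != p.1 && decide (q.2.length ≤ p.2.length) && q.2 == p.2.take q.2.length)
      then acc else acc ++ [p.2])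
    = (fun acc p =>
      if !(PySem.List.enumerate sf 0).any (fun q =>
          q.1 != p.1 && decide (q.2.length ≤ p.2.length) && q.2 == p.2.take q.2.length)
      then acc ++ [p.2] else acc) := by
    funext acc p
    cases h : (PySem.List.enumerate sf 0).any (fun q =>
        q.1 != p.1 && decide (q.2.length ≤ p.2.length) && q.2 == p.2.take q.2.length) <;> simp
  rw [hstep, PySem.List.foldl_append_if]
  rw [List.nil_append, List.nil_append]
  have hfc : (PySem.List.enumerate sf 0).filter (fun p =>
      !(PySem.List.enumerate sf 0).any (fun q =>
          q.1 != p.1 && decide (q.2.length ≤ p.2.length) && q.2 == p.2.take q.2.length))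
    = (PySem.List.enumerate sf 0).filter (fun p =>
        ((sf.foldl (fun d t => d.insert t (d.getD t 0 + 1))
          (PySem.Dict.empty : PySem.Dict (List Int) Int)).getD p.2 0 == 1 &&
         (List.range p.2.length).all (fun k =>
          (sf.foldl (fun d t => d.insert t (d.getD t 0 + 1))
            (PySem.Dict.empty : PySem.Dict (List Int) Int)).getD (p.2.take k) 0 == 0))) := by
    apply List.filter_congr
    intro p hp
    rw [PySem.List.mem_enumerate_iff] at hp
    obtain ⟨k, hk, rfl⟩ := hp
    simp only [hcount]
    exact pointwise sf k hk
  rw [hfc]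
  have := List.filter_map (f := fun (p : Int × List Int) => p.2)
    (p := fun c =>
      ((sf.foldl (fun d t => d.insert t (d.getD t 0 + 1))
        (PySem.Dict.empty : PySem.Dict (List Int) Int)).getD c 0 == 1 &&
       (List.range c.length).all (fun k =>
        (sf.foldl (fun d t => d.insert t (d.getD t 0 + 1))
          (PySem.Dict.empty : PySem.Dict (List Int) Int)).getD (c.take k) 0 == 0)))
    (l := PySem.List.enumerate sf 0)
  rw [PySem.List.map_snd_enumerate] at this
  simpa [Function.comp] using this.symm

-- ===== VERDICT (by name: the statement is the Claim_ definition above) =====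
theorem superset_elimination_spec : Claim_equal_superset_elimination := by
  intro formula _
  unfold Spec_superset_elimination superset_elimination superset_elimination_alt
  exact main_eq (formula.map fun c => PySem.List.sorted c (fun x => x) false)
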